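-- pv_equiv track=rewrite | github.com/wojciechkowalczyk11to-tech/Gangoos-coder | mcp-server/codeact_agent.py | auto_route
-- ===== SOURCE A (Python) =====
-- def auto_route(task: str) -> str:
--     """Automatyczny wybór najtańszego modelu dla zadania (uwzględniając WSZYSTKIE)."""
--     task_lower = task.lower()
--
--     # Gemini: długi kontekst, rozumowanie
--     if any(kw in task_lower for kw in ["reasoning", "długi", "context", "analyze", "deep"]):
--         return "gemini"
--
--     # Groq: ultra-szybkie, ogólne
--     if any(kw in task_lower for kw in ["szybko", "fast", "quick", "general"]):
--         return "groq"
--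
--     # Codestral: kod, refaktoring
--     if any(kw in task_lower for kw in ["código", "code", "refactor", "function", "generate"]):
--         return "codestral"
--
--     # Mistral: GitHub, PR, review
--     if any(kw in task_lower for kw in ["github", "pr", "pull request", "bug", "issue", "review"]):
--         return "mistral"
--
--     # Grok: research, web
--     if any(kw in task_lower for kw in ["research", "znajdź", "wyszukaj", "web", "explore"]):
--         return "grok"
--
--     # OpenAI: JSON, structured
--     if any(kw in task_lower for kw in ["json", "structured", "schema", "parse"]):
--         return "openai"
--
--     # Local Ollama: free, local
--     if any(kw in task_lower for kw in ["offline", "local", "free", "ollama"]):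
--         return "ollama"
--
--     # Default: DeepSeek (najtańszy coder)
--     return "deepseek"
-- ===== SOURCE B (Python) =====
-- # Flat keyword index: each keyword maps to (priority, model).  The routed model is
-- # the model of minimal priority among all keywords occurring in the task (min over
-- # matches), instead of walking an ordered chain of branch conditions.
-- KEYWORD_MODEL = {
--     "reasoning": (0, "gemini"), "d\u0142ugi": (0, "gemini"), "context": (0, "gemini"),
--     "analyze": (0, "gemini"), "deep": (0, "gemini"),
--     "szybko": (1, "groq"), "fast": (1, "groq"), "quick": (1, "groq"), "general": (1, "groq"),
--     "c\u00f3digo": (2, "codestral"), "code": (2, "codestral"), "refactor": (2, "codestral"),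
--     "function": (2, "codestral"), "generate": (2, "codestral"),
--     "github": (3, "mistral"), "pr": (3, "mistral"), "pull request": (3, "mistral"),
--     "bug": (3, "mistral"), "issue": (3, "mistral"), "review": (3, "mistral"),
--     "research": (4, "grok"), "znajd\u017a": (4, "grok"), "wyszukaj": (4, "grok"),
--     "web": (4, "grok"), "explore": (4, "grok"),
--     "json": (5, "openai"), "structured": (5, "openai"), "schema": (5, "openai"),
--     "parse": (5, "openai"),
--     "offline": (6, "ollama"), "local": (6, "ollama"), "free": (6, "ollama"),
--     "ollama": (6, "ollama"),
-- }
--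
-- def auto_route(task: str) -> str:
--     t = task.lower()
--     return min((pm for kw, pm in KEYWORD_MODEL.items() if kw in t),
--                default=(7, "deepseek"))[1]
-- ===== Notes on version B (the rewrite author's own statement) =====
-- stated objective: alternative
-- what changed: Replaces the ordered chain of seven any()-branches by a flat keyword->(priority,model) index: B collects every keyword occurring in the task and returns the model of minimal priority via min() with a default, instead of first-match branch control flow.
import Mathlib
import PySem

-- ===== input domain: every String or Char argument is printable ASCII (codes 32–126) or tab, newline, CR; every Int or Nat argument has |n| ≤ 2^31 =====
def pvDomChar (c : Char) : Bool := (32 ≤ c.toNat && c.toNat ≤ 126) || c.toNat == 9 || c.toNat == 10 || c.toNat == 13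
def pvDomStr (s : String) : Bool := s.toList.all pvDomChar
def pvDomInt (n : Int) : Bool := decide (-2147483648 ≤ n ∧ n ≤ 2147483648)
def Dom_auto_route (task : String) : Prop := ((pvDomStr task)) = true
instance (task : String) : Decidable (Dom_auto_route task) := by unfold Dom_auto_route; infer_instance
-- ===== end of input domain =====

-- B replaces A's ordered chain of any()-branches by a flat keyword→(priority,model) index and
-- returns the model of minimal priority among matching keywords (objective: alternative).

-- ===== PORT A =====
def auto_route (task : String) : String :=
  let task_lower := PySem.Str.lower task
  if ["reasoning", "długi", "context", "analyze", "deep"].any (fun kw => PySem.Str.isIn kw task_lower) then "gemini"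
  else if ["szybko", "fast", "quick", "general"].any (fun kw => PySem.Str.isIn kw task_lower) then "groq"
  else if ["código", "code", "refactor", "function", "generate"].any (fun kw => PySem.Str.isIn kw task_lower) then "codestral"
  else if ["github", "pr", "pull request", "bug", "issue", "review"].any (fun kw => PySem.Str.isIn kw task_lower) then "mistral"
  else if ["research", "znajdź", "wyszukaj", "web", "explore"].any (fun kw => PySem.Str.isIn kw task_lower) then "grok"
  else if ["json", "structured", "schema", "parse"].any (fun kw => PySem.Str.isIn kw task_lower) then "openai"
  else if ["offline", "local", "free", "ollama"].any (fun kw => PySem.Str.isIn kw task_lower) then "ollama"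
  else "deepseek"

-- ===== PORT B =====
-- Source B's dict KEYWORD_MODEL as an association list in insertion order
def KEYWORD_MODEL : List (String × Int × String) :=
  [("reasoning", 0, "gemini"), ("długi", 0, "gemini"), ("context", 0, "gemini"),
   ("analyze", 0, "gemini"), ("deep", 0, "gemini"),
   ("szybko", 1, "groq"), ("fast", 1, "groq"), ("quick", 1, "groq"), ("general", 1, "groq"),
   ("código", 2, "codestral"), ("code", 2, "codestral"), ("refactor", 2, "codestral"),
   ("function", 2, "codestral"), ("generate", 2, "codestral"),
   ("github", 3, "mistral"), ("pr", 3, "mistral"), ("pull request", 3, "mistral"),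
   ("bug", 3, "mistral"), ("issue", 3, "mistral"), ("review", 3, "mistral"),
   ("research", 4, "grok"), ("znajdź", 4, "grok"), ("wyszukaj", 4, "grok"),
   ("web", 4, "grok"), ("explore", 4, "grok"),
   ("json", 5, "openai"), ("structured", 5, "openai"), ("schema", 5, "openai"),
   ("parse", 5, "openai"),
   ("offline", 6, "ollama"), ("local", 6, "ollama"), ("free", 6, "ollama"),
   ("ollama", 6, "ollama")]

-- Python's min over (int, str) tuples: lexicographic, keeps the FIRST minimal element
-- (replace the accumulator only on strict lexicographic less) — exact hand port.
def pyMinStep (acc y : Int × String) : Int × String :=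
  if y.1 < acc.1 ∨ (y.1 = acc.1 ∧ y.2 < acc.2) then y else acc

def auto_route_alt (task : String) : String :=
  let t := PySem.Str.lower task
  -- the generator: (priority, model) pairs of the keywords occurring in t
  let matched := (KEYWORD_MODEL.filter (fun p => PySem.Str.isIn p.1 t)).map Prod.snd
  -- min(matched, default=(7, "deepseek"))[1]
  (match matched with
   | [] => ((7 : Int), "deepseek")
   | x :: xs => xs.foldl pyMinStep x).2

-- ===== PRECONDITION & SPEC =====
def Spec_auto_route (task : String) (out : String) : Prop := out = auto_route_alt task
instance (task : String) (out : String) : Decidable (Spec_auto_route task out) := by unfold Spec_auto_route; infer_instance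

-- ===== CLAIM (what is proved, stated in full; the proofs are below) =====
def Claim_equal_auto_route : Prop := ∀ (task : String), Dom_auto_route task → Spec_auto_route task (auto_route task)

-- ===== LEMMAS AND PROOFS =====

-- first-match scan over the flat keyword list: the common characterisation of both ports
def firstMatch (t : String) : List (String × Int × String) → String
  | [] => "deepseek"
  | (kw, _, m) :: rest => if PySem.Str.isIn kw t then m else firstMatch t rest

-- collapse 'if a then m else if b then m else X' into a disjunction (bridges A's grouped any())
theorem if_collapse {α : Type} (a b : Bool) (m X : α) :
    (if a then m else if b then m else X) = (if (a || b) then m else X) := by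
  cases a <;> simp

theorem auto_route_eq_firstMatch (task : String) :
    auto_route task = firstMatch (PySem.Str.lower task) KEYWORD_MODEL := by
  simp only [auto_route, firstMatch, KEYWORD_MODEL, List.any_cons, List.any_nil,
    Bool.or_false, if_collapse]

-- firstMatch is the model of the head of the filtered list
theorem firstMatch_filter (t : String) (L : List (String × Int × String)) :
    firstMatch t L =
      (match L.filter (fun p => PySem.Str.isIn p.1 t) with
       | [] => "deepseek"
       | x :: _ => x.2.2) := by
  induction L with
  | nil => rfl
  | cons p rest ih =>
      obtain ⟨kw, pr, m⟩ := p
      by_cases h : PySem.Str.isIn kw t = true <;>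
        simp [firstMatch, h, ih, -PySem.Str.isIn_eq]

-- if every later element is strictly larger in priority or equal as a pair,
-- Python's min-fold keeps the head
theorem foldl_pyMinStep_head (xs : List (Int × String)) (x : Int × String)
    (h : ∀ y ∈ xs, x.1 < y.1 ∨ (x.1 = y.1 ∧ x.2 = y.2)) :
    xs.foldl pyMinStep x = x := by
  induction xs with
  | nil => rfl
  | cons y ys ih =>
      have hy := h y (by simp)
      have hstep : pyMinStep x y = x := by
        unfold pyMinStep
        rcases hy with h1 | ⟨h1, h2⟩
        · rw [if_neg]; rintro (h' | ⟨h', _⟩) <;> omega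
        · rw [if_neg]; rintro (h' | ⟨_, h'⟩)
          · omega
          · rw [h2] at h'; exact lt_irrefl _ h'
      rw [List.foldl_cons, hstep]
      exact ih (fun y hy => h y (by simp [hy]))

-- the pair list of KEYWORD_MODEL is ordered: later pairs have larger priority or are equal
theorem keyword_pairs_pairwise :
    (KEYWORD_MODEL.map Prod.snd).Pairwise
      (fun a b => a.1 < b.1 ∨ (a.1 = b.1 ∧ a.2 = b.2)) := by
  decide

theorem auto_route_alt_eq_firstMatch (task : String) :
    auto_route_alt task = firstMatch (PySem.Str.lower task) KEYWORD_MODEL := by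
  unfold auto_route_alt
  rw [firstMatch_filter]
  set t := PySem.Str.lower task with ht
  have hsub : ((KEYWORD_MODEL.filter (fun p => PySem.Str.isIn p.1 t)).map Prod.snd).Sublist
      (KEYWORD_MODEL.map Prod.snd) :=
    List.Sublist.map Prod.snd List.filter_sublist
  have hpw := keyword_pairs_pairwise.sublist hsub
  cases hflt : KEYWORD_MODEL.filter (fun p => PySem.Str.isIn p.1 t) with
  | nil =>
      simp only [hflt, List.map_nil]
  | cons x xs =>
      simp only [hflt, List.map_cons]
      rw [hflt, List.map_cons] at hpw
      rw [foldl_pyMinStep_head _ _ (by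
        intro y hy
        exact (List.pairwise_cons.mp hpw).1 y hy)]

-- ===== VERDICT (by name: the statement is the Claim_ definition above) =====
theorem auto_route_spec : Claim_equal_auto_route := by
  intro task _
  unfold Spec_auto_route
  rw [auto_route_eq_firstMatch, auto_route_alt_eq_firstMatch]
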